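-- pv_equiv track=rewrite | github.com/alexwashburn1/stanford-sleep-and-AD-research | LIDS_analysis_new.py | normalized_binned_by_etiology
-- ===== SOURCE A (Python) =====
-- def normalized_binned_by_etiology(filenames, age_sex_etiology_dict):
--     """
--     Generates a list of filenames for subjects of sex Male and Female, by looking them up in the demographics
--     dictionary.
--     :param filenames: the list of all 166 filenames
--     :param age_sex_etiology_dict: the dictionary containing sex information about all n=166 filenames
--     :return: male_female_file_list_tuple - a tuple, containing the male and female filename lists, respectively.
--     """
--     HC_filenames_list = []
--     AD_filenames_list = []
--     LB_filenames_list = []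
--     other_filenames_list = []   # ignore this, since we won't plot them.
--
--     for filename in filenames:
--         filename = filename.replace("-timeSeries.csv.gz", "")
--         etiology = age_sex_etiology_dict[filename][2]
--         if etiology == 'HC':
--             HC_filenames_list.append(filename + "-timeSeries.csv.gz")
--         elif etiology == 'AD':
--             AD_filenames_list.append(filename + "-timeSeries.csv.gz")
--         elif etiology == 'LB':
--             LB_filenames_list.append(filename + "-timeSeries.csv.gz")
--         else:
--             # etiology must be "other"
--             other_filenames_list.append(other_filenames_list)
--
--     etiology_file_list_tuple = (HC_filenames_list, AD_filenames_list, LB_filenames_list)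
--     return etiology_file_list_tuple     # order of tuple is HC, AD, LB
-- ===== SOURCE B (Python) =====
-- def normalized_binned_by_etiology(filenames, age_sex_etiology_dict):
--     suffix = "-timeSeries.csv.gz"
--
--     def etiology_of(filename):
--         return age_sex_etiology_dict[filename.replace(suffix, "")][2]
--
--     HC = [f.replace(suffix, "") + suffix for f in filenames if etiology_of(f) == 'HC']
--     AD = [f.replace(suffix, "") + suffix for f in filenames if etiology_of(f) == 'AD']
--     LB = [f.replace(suffix, "") + suffix for f in filenames if etiology_of(f) == 'LB']
--     return (HC, AD, LB)
-- ===== Notes on version B (the rewrite author's own statement) =====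
-- stated objective: alternative
-- what changed: Replaces A's single branching pass with four mutable accumulator lists by three independent filtering comprehensions (one per etiology category), dropping the dead 'other' accumulator.
import Mathlib
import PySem

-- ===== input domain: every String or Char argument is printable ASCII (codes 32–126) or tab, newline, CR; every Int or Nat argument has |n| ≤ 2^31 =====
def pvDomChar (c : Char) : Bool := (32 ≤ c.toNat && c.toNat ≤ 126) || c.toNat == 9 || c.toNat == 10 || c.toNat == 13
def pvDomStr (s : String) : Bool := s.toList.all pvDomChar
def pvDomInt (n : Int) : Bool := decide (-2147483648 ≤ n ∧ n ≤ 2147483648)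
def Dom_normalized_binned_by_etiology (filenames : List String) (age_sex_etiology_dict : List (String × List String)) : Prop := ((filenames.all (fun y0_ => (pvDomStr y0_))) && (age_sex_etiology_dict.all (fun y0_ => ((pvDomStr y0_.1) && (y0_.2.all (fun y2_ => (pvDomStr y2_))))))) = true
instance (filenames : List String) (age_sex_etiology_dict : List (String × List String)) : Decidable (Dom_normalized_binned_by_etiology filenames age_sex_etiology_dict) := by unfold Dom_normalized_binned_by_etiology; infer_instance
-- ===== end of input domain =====

-- B replaces A's single branching pass (four mutable accumulators) by three independent
-- filtering comprehensions, one per etiology category; the dead 'other' list is dropped.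


-- ===== PORT A =====
-- filename.replace("-timeSeries.csv.gz", "")
def pvKey (filename : String) : String :=
  PySem.Str.replace filename "-timeSeries.csv.gz" ""

-- age_sex_etiology_dict[key][2]; total via defaults, used only under Pre_ (key present, ≥ 3 entries)
def pvEt (age_sex_etiology_dict : List (String × List String)) (key : String) : String :=
  PySem.List.pyGetD (PySem.Dict.getD (PySem.Dict.ofList age_sex_etiology_dict) key []) 2 ""

-- the loop body; the 'other' branch of A only appends to a list that is never returned
-- (and never read), so the fold state carries only the three returned lists.
def pvStepA (age_sex_etiology_dict : List (String × List String))
    (acc : List String × List String × List String) (filename : String) :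
    List String × List String × List String :=
  let filename := pvKey filename
  let etiology := pvEt age_sex_etiology_dict filename
  if etiology = "HC" then (acc.1 ++ [filename ++ "-timeSeries.csv.gz"], acc.2.1, acc.2.2)
  else if etiology = "AD" then (acc.1, acc.2.1 ++ [filename ++ "-timeSeries.csv.gz"], acc.2.2)
  else if etiology = "LB" then (acc.1, acc.2.1, acc.2.2 ++ [filename ++ "-timeSeries.csv.gz"])
  else acc

def normalized_binned_by_etiology (filenames : List String) (age_sex_etiology_dict : List (String × List String)) : List String × List String × List String :=
  filenames.foldl (pvStepA age_sex_etiology_dict) ([], [], [])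

-- ===== PORT B =====
-- one comprehension per category: [f.replace(suf,"") + suf for f in filenames if et(f) == c]
def pvBin (filenames : List String) (age_sex_etiology_dict : List (String × List String)) (c : String) : List String :=
  (filenames.filter (fun f => pvEt age_sex_etiology_dict (pvKey f) = c)).map
    (fun f => pvKey f ++ "-timeSeries.csv.gz")

def normalized_binned_by_etiology_alt (filenames : List String) (age_sex_etiology_dict : List (String × List String)) : List String × List String × List String :=
  (pvBin filenames age_sex_etiology_dict "HC",
   pvBin filenames age_sex_etiology_dict "AD",
   pvBin filenames age_sex_etiology_dict "LB")

-- ===== PRECONDITION & SPEC =====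
-- Python A raises KeyError if a stripped filename is missing from the dict, and IndexError
-- if its entry has fewer than 3 fields; Pre_ excludes exactly those inputs.
def Pre_normalized_binned_by_etiology (filenames : List String) (age_sex_etiology_dict : List (String × List String)) : Prop :=
  ∀ f ∈ filenames, ∃ v, (PySem.Dict.ofList age_sex_etiology_dict).get? (pvKey f) = some v ∧ 3 ≤ v.length
instance (filenames : List String) (age_sex_etiology_dict : List (String × List String)) : Decidable (Pre_normalized_binned_by_etiology filenames age_sex_etiology_dict) := by unfold Pre_normalized_binned_by_etiology; infer_instance

def pvWitness_normalized_binned_by_etiology : List String × (List (String × List String)) :=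
  (["x-timeSeries.csv.gz", "y", "z-timeSeries.csv.gz"],
   [("x", ["71", "M", "HC"]), ("y", ["64", "F", "AD"]), ("z", ["80", "F", "other"])])

def Spec_normalized_binned_by_etiology (filenames : List String) (age_sex_etiology_dict : List (String × List String)) (out : List String × List String × List String) : Prop := out = normalized_binned_by_etiology_alt filenames age_sex_etiology_dict
instance (filenames : List String) (age_sex_etiology_dict : List (String × List String)) (out : List String × List String × List String) : Decidable (Spec_normalized_binned_by_etiology filenames age_sex_etiology_dict out) := by unfold Spec_normalized_binned_by_etiology; infer_instance

-- ===== CLAIM (what is proved, stated in full; the proofs are below) =====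
def Claim_equal_normalized_binned_by_etiology : Prop := ∀ (filenames : List String) (age_sex_etiology_dict : List (String × List String)), Dom_normalized_binned_by_etiology filenames age_sex_etiology_dict → Pre_normalized_binned_by_etiology filenames age_sex_etiology_dict → Spec_normalized_binned_by_etiology filenames age_sex_etiology_dict (normalized_binned_by_etiology filenames age_sex_etiology_dict)

-- ===== LEMMAS AND PROOFS =====
theorem pv_witness_ok :
    Dom_normalized_binned_by_etiology pvWitness_normalized_binned_by_etiology.1 pvWitness_normalized_binned_by_etiology.2 ∧
    Pre_normalized_binned_by_etiology pvWitness_normalized_binned_by_etiology.1 pvWitness_normalized_binned_by_etiology.2 := by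
  decide

-- the fold over A's step, started from arbitrary accumulators, appends B's three bins
theorem pv_fold_eq (d : List (String × List String)) (fs : List String)
    (hc ad lb : List String) :
    fs.foldl (pvStepA d) (hc, ad, lb) =
      (hc ++ pvBin fs d "HC", ad ++ pvBin fs d "AD", lb ++ pvBin fs d "LB") := by
  induction fs generalizing hc ad lb with
  | nil => simp [pvBin]
  | cons f fs ih =>
    simp only [List.foldl_cons]
    by_cases h1 : pvEt d (pvKey f) = "HC"
    · simp [pvStepA, h1, ih, pvBin]
    · by_cases h2 : pvEt d (pvKey f) = "AD"
      · simp [pvStepA, h2, ih, pvBin]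
      · by_cases h3 : pvEt d (pvKey f) = "LB"
        · simp [pvStepA, h3, ih, pvBin]
        · simp [pvStepA, h1, h2, h3, ih, pvBin]

-- ===== VERDICT (by name: the statement is the Claim_ definition above) =====
theorem normalized_binned_by_etiology_spec : Claim_equal_normalized_binned_by_etiology := by
  intro filenames d _ _
  unfold Spec_normalized_binned_by_etiology normalized_binned_by_etiology normalized_binned_by_etiology_alt
  simp [pv_fold_eq]
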